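-- pv_equiv track=rewrite | github.com/vitaliytsoy/problem_solving | python/medium/martix_game_of_life.py | get_alive_neighbours_count
-- ===== SOURCE A (Python) =====
-- neighbours = [(-1, -1), (0, -1), (1, -1), (1, 0), (1, 1), (0, 1), (-1, 1), (-1, 0)]
--
-- def get_alive_neighbours_count(board, i, j):
--     count = 0
--
--     for neigbours in neighbours:
--         i_mod, j_mod = neigbours
--
--         if i + i_mod < 0 or i + i_mod >= len(board):
--             continue
--
--         if j + j_mod < 0 or j + j_mod >= len(board[0]):
--             continue
--
--         if board[i + i_mod][j+j_mod] == 1: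
--             count += 1
--
--     return count
-- ===== SOURCE B (Python) =====
-- def get_alive_neighbours_count(board, i, j):
--     alive = {(r, c) for r, row in enumerate(board) for c, cell in enumerate(row) if cell == 1}
--     count = 0
--     for di in (-1, 0, 1):
--         for dj in (-1, 0, 1):
--             if (di, dj) != (0, 0) and (i + di, j + dj) in alive:
--                 count += 1
--     return count
-- ===== Notes on version B (the rewrite author's own statement) =====
-- stated objective: alternative
-- what changed: B first builds a set of the coordinates of all alive cells in one pass over the board and then answers with eight pure membership tests, so A's per-neighbour bounds arithmetic and row/column indexing disappear.
-- outside the precondition, e.g. on get_alive_neighbours_count([[1], [0, 1]], 1, 0): A returns 1, B returns 2; on get_alive_neighbours_count([[0, 0], [1]], 0, 0): A raises IndexError, B returns 1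
import Mathlib
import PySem

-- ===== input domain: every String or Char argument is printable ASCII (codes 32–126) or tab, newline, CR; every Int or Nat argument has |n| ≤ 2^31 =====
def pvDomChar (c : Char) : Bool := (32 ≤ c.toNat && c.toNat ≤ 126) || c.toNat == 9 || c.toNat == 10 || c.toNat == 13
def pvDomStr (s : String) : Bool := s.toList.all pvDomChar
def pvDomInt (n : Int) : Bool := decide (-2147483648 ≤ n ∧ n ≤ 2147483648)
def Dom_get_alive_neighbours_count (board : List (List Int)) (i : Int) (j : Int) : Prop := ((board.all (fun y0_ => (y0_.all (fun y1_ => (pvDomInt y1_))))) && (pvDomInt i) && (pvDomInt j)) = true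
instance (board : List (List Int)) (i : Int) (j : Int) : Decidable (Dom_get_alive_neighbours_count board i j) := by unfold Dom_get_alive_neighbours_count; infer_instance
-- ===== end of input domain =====

-- B builds a set of the coordinates of all alive cells once and answers with eight
-- membership tests, replacing A's per-neighbour bounds arithmetic and indexing
-- (a different data structure and traversal; not faster for a single query).

-- ===== PORT A =====
def pvNeighbours : List (Int × Int) :=
  [(-1, -1), (0, -1), (1, -1), (1, 0), (1, 1), (0, 1), (-1, 1), (-1, 0)]

def get_alive_neighbours_count (board : List (List Int)) (i : Int) (j : Int) : Int :=
  pvNeighbours.foldl (fun count p =>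
    if i + p.1 < 0 ∨ i + p.1 ≥ (board.length : Int) then count
    else if j + p.2 < 0 ∨ j + p.2 ≥ ((board.headD []).length : Int) then count
    else if ((PySem.List.pyGet? board (i + p.1)).bind
               (fun row => PySem.List.pyGet? row (j + p.2))) = some 1 then count + 1
    else count) 0

-- ===== PORT B =====
-- the set comprehension {(r, c) for r, row in enumerate(board) for c, cell in enumerate(row) if cell == 1}
def pvAlive (board : List (List Int)) : PySem.Set (Int × Int) :=
  PySem.Set.ofList ((PySem.List.enumerate board).flatMap (fun p =>
    (PySem.List.enumerate p.2).filterMap (fun q =>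
      if q.2 = 1 then some (p.1, q.1) else none)))

def get_alive_neighbours_count_alt (board : List (List Int)) (i : Int) (j : Int) : Int :=
  let alive := pvAlive board
  ([-1, 0, 1] : List Int).foldl (fun count di =>
    ([-1, 0, 1] : List Int).foldl (fun count dj =>
      if (di, dj) ≠ ((0 : Int), (0 : Int)) ∧ (i + di, j + dj) ∈ alive
      then count + 1 else count) count) 0

-- ===== PRECONDITION & SPEC =====
-- Pre_ excludes boards that are ragged inside the probed 3x3 window: a neighbour row whose
-- length differs from len(board[0]) across a probed column, where A either raises IndexError
-- on a too-short row or, bounding columns by len(board[0]), ignores alive cells of a longer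
-- row that B sees.
def Pre_get_alive_neighbours_count (board : List (List Int)) (i : Int) (j : Int) : Prop :=
  ∀ r ∈ [i - 1, i, i + 1], ∀ c ∈ [j - 1, j, j + 1],
    ¬(r = i ∧ c = j) → 0 ≤ r → r < (board.length : Int) → 0 ≤ c →
    (c < ((board.headD []).length : Int) ↔
     c < ((((PySem.List.pyGet? board r).getD []).length : Int)))
instance (board : List (List Int)) (i : Int) (j : Int) : Decidable (Pre_get_alive_neighbours_count board i j) := by unfold Pre_get_alive_neighbours_count; infer_instance
def pvWitness_get_alive_neighbours_count : List (List Int) × Int × Int := ([[1, 0], [0, 1]], 0, 0)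

def Spec_get_alive_neighbours_count (board : List (List Int)) (i : Int) (j : Int) (out : Int) : Prop := out = get_alive_neighbours_count_alt board i j
instance (board : List (List Int)) (i : Int) (j : Int) (out : Int) : Decidable (Spec_get_alive_neighbours_count board i j out) := by unfold Spec_get_alive_neighbours_count; infer_instance

-- ===== CLAIM (what is proved, stated in full; the proofs are below) =====
def Claim_equal_get_alive_neighbours_count : Prop := ∀ (board : List (List Int)) (i : Int) (j : Int), Dom_get_alive_neighbours_count board i j → Pre_get_alive_neighbours_count board i j → Spec_get_alive_neighbours_count board i j (get_alive_neighbours_count board i j)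

-- ===== LEMMAS AND PROOFS =====

/-- 0/1 indicator of a live cell, via the lookup A performs. -/
def pvCell (board : List (List Int)) (r c : Int) : Int :=
  if ((PySem.List.pyGet? board r).bind (fun row => PySem.List.pyGet? row c)) = some 1 then 1 else 0

/-- Bounds-guarded indicator. -/
def pvTg (board : List (List Int)) (r c : Int) : Int :=
  if 0 ≤ r ∧ r < (board.length : Int) then
    (if 0 ≤ c ∧ c < ((board.headD []).length : Int) then pvCell board r c else 0)
  else 0

lemma pv_foldA (board : List (List Int)) (i j : Int) (l : List (Int × Int)) (c0 : Int) :
    l.foldl (fun count p =>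
      if i + p.1 < 0 ∨ i + p.1 ≥ (board.length : Int) then count
      else if j + p.2 < 0 ∨ j + p.2 ≥ ((board.headD []).length : Int) then count
      else if ((PySem.List.pyGet? board (i + p.1)).bind
                 (fun row => PySem.List.pyGet? row (j + p.2))) = some 1 then count + 1
      else count) c0
    = c0 + (l.map (fun p => pvTg board (i + p.1) (j + p.2))).sum := by
  induction l generalizing c0 with
  | nil => simp
  | cons p l ih =>
    simp only [List.foldl_cons, List.map_cons, List.sum_cons, ih]
    have h : (if i + p.1 < 0 ∨ i + p.1 ≥ (board.length : Int) then c0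
        else if j + p.2 < 0 ∨ j + p.2 ≥ ((board.headD []).length : Int) then c0
        else if ((PySem.List.pyGet? board (i + p.1)).bind
                   (fun row => PySem.List.pyGet? row (j + p.2))) = some 1 then c0 + 1
        else c0) = c0 + pvTg board (i + p.1) (j + p.2) := by
      unfold pvTg pvCell
      split_ifs <;> omega
    rw [h]; ring

lemma pv_A_eq (board : List (List Int)) (i j : Int) :
    get_alive_neighbours_count board i j
      = pvTg board (i - 1) (j - 1) + pvTg board i (j - 1) + pvTg board (i + 1) (j - 1)
        + pvTg board (i + 1) j + pvTg board (i + 1) (j + 1) + pvTg board i (j + 1)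
        + pvTg board (i - 1) (j + 1) + pvTg board (i - 1) j := by
  unfold get_alive_neighbours_count
  rw [pv_foldA]
  have e1 : i + (-1 : Int) = i - 1 := by ring
  have e2 : j + (-1 : Int) = j - 1 := by ring
  have e3 : i + (0 : Int) = i := by ring
  have e4 : j + (0 : Int) = j := by ring
  simp only [pvNeighbours, List.map_cons, List.map_nil, List.sum_cons, List.sum_nil,
    e1, e2, e3, e4]
  ring

/-- Membership in the alive set: nonnegative coordinates whose looked-up cell is 1. -/
lemma pv_mem_alive (board : List (List Int)) (r c : Int) :
    (r, c) ∈ pvAlive board ↔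
      (0 ≤ r ∧ 0 ≤ c ∧
       ((PySem.List.pyGet? board r).bind (fun row => PySem.List.pyGet? row c)) = some 1) := by
  unfold pvAlive
  rw [PySem.Set.mem_ofList]
  simp only [List.mem_flatMap, List.mem_filterMap, PySem.List.mem_enumerate_iff]
  constructor
  · rintro ⟨p, ⟨k, hk, rfl⟩, q, ⟨l, hl, rfl⟩, hq⟩
    simp only [zero_add] at *
    by_cases h1 : board[k][l] = 1
    · rw [if_pos h1, Option.some.injEq, Prod.mk.injEq] at hq
      obtain ⟨rfl, rfl⟩ := hq
      refine ⟨Int.natCast_nonneg k, Int.natCast_nonneg l, ?_⟩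
      rw [PySem.List.pyGet?_natCast, List.getElem?_eq_getElem hk]
      simp only [Option.bind_some]
      rw [PySem.List.pyGet?_natCast, List.getElem?_eq_getElem hl, h1]
    · rw [if_neg h1] at hq; exact absurd hq (by simp)
  · rintro ⟨hr0, hc0, hget⟩
    have hr : r = (r.toNat : Int) := by omega
    have hc : c = (c.toNat : Int) := by omega
    rw [hr, PySem.List.pyGet?_natCast] at hget
    cases h1 : board[r.toNat]? with
    | none => rw [h1] at hget; simp at hget
    | some row =>
      rw [h1] at hget
      simp only [Option.bind_some] at hget
      rw [hc, PySem.List.pyGet?_natCast] at hget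
      obtain ⟨hkn, hrow⟩ := List.getElem?_eq_some_iff.mp h1
      obtain ⟨hln, hcell⟩ := List.getElem?_eq_some_iff.mp hget
      exact ⟨(r, row), ⟨r.toNat, hkn, by rw [zero_add, ← hr, hrow]⟩,
        (c, row[c.toNat]), ⟨c.toNat, hln, by rw [zero_add, ← hc]⟩,
        by rw [if_pos hcell]⟩

/-- Under the window shape condition the membership indicator equals A's guarded indicator. -/
lemma pv_mem_ind (board : List (List Int)) (r c : Int)
    (h : 0 ≤ r → r < (board.length : Int) → 0 ≤ c →
      (c < ((board.headD []).length : Int) ↔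
       c < ((((PySem.List.pyGet? board r).getD []).length : Int)))) :
    (if (r, c) ∈ pvAlive board then (1 : Int) else 0) = pvTg board r c := by
  unfold pvTg pvCell
  by_cases hm : (r, c) ∈ pvAlive board
  · obtain ⟨hr0, hc0, hget⟩ := (pv_mem_alive board r c).mp hm
    cases h1 : PySem.List.pyGet? board r with
    | none => rw [h1] at hget; simp at hget
    | some row =>
      rw [h1] at hget
      simp only [Option.bind_some] at hget
      have hr : r = (r.toNat : Int) := by omega
      have hc : c = (c.toNat : Int) := by omega
      have h1n : board[r.toNat]? = some row := by
        rw [← PySem.List.pyGet?_natCast, ← hr]; exact h1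
      obtain ⟨hkn, -⟩ := List.getElem?_eq_some_iff.mp h1n
      have hrn : r < (board.length : Int) := by omega
      have hcl : c < (row.length : Int) := by
        have hget' := hget
        rw [hc, PySem.List.pyGet?_natCast] at hget'
        obtain ⟨hln, -⟩ := List.getElem?_eq_some_iff.mp hget'
        omega
      have hcm : c < ((board.headD []).length : Int) := by
        refine (h hr0 hrn hc0).mpr ?_
        rw [h1]
        simpa using hcl
      rw [if_pos hm, if_pos ⟨hr0, hrn⟩, if_pos ⟨hc0, hcm⟩]
      simp only [Option.bind_some]
      rw [if_pos hget]
  · rw [if_neg hm]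
    split_ifs with g1 g2 g3
    · exact absurd ((pv_mem_alive board r c).mpr ⟨g1.1, g2.1, g3⟩) hm
    all_goals rfl

lemma pv_if_count (P : Prop) [Decidable P] (c : Int) :
    (if P then c + 1 else c) = c + (if P then 1 else 0) := by
  split_ifs <;> ring

lemma pv_ite_and_true {P Q : Prop} [Decidable P] [Decidable Q] (h : P) (a b : Int) :
    (if P ∧ Q then a else b) = if Q then a else b := by simp [h]

lemma pv_ite_and_false {P Q : Prop} [Decidable P] [Decidable Q] (h : ¬P) (a b : Int) :
    (if P ∧ Q then a else b) = b := by simp [h]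

lemma pv_B_eq (board : List (List Int)) (i j : Int)
    (hpre : Pre_get_alive_neighbours_count board i j) :
    get_alive_neighbours_count_alt board i j
      = pvTg board (i - 1) (j - 1) + pvTg board (i - 1) j + pvTg board (i - 1) (j + 1)
        + pvTg board i (j - 1) + pvTg board i (j + 1)
        + pvTg board (i + 1) (j - 1) + pvTg board (i + 1) j + pvTg board (i + 1) (j + 1) := by
  unfold Pre_get_alive_neighbours_count at hpre
  simp only [get_alive_neighbours_count_alt, List.foldl_cons, List.foldl_nil, pv_if_count]
  rw [pv_ite_and_true (by decide : ((-1 : Int), (-1 : Int)) ≠ (0, 0)),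
      pv_ite_and_true (by decide : ((-1 : Int), (0 : Int)) ≠ (0, 0)),
      pv_ite_and_true (by decide : ((-1 : Int), (1 : Int)) ≠ (0, 0)),
      pv_ite_and_true (by decide : ((0 : Int), (-1 : Int)) ≠ (0, 0)),
      pv_ite_and_false (by decide : ¬ ((0 : Int), (0 : Int)) ≠ (0, 0)),
      pv_ite_and_true (by decide : ((0 : Int), (1 : Int)) ≠ (0, 0)),
      pv_ite_and_true (by decide : ((1 : Int), (-1 : Int)) ≠ (0, 0)),
      pv_ite_and_true (by decide : ((1 : Int), (0 : Int)) ≠ (0, 0)),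
      pv_ite_and_true (by decide : ((1 : Int), (1 : Int)) ≠ (0, 0))]
  have e1 : i + (-1 : Int) = i - 1 := by ring
  have e2 : j + (-1 : Int) = j - 1 := by ring
  have e3 : i + (0 : Int) = i := by ring
  have e4 : j + (0 : Int) = j := by ring
  rw [e1, e2, e3, e4]
  have hmem1 : (i - 1) ∈ [i - 1, i, i + 1] := by simp
  have hmem2 : i ∈ [i - 1, i, i + 1] := by simp
  have hmem3 : (i + 1) ∈ [i - 1, i, i + 1] := by simp
  have hmem4 : (j - 1) ∈ [j - 1, j, j + 1] := by simp
  have hmem5 : j ∈ [j - 1, j, j + 1] := by simp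
  have hmem6 : (j + 1) ∈ [j - 1, j, j + 1] := by simp
  rw [pv_mem_ind board (i - 1) (j - 1) (hpre _ hmem1 _ hmem4 (by omega)),
      pv_mem_ind board (i - 1) j (hpre _ hmem1 _ hmem5 (by omega)),
      pv_mem_ind board (i - 1) (j + 1) (hpre _ hmem1 _ hmem6 (by omega)),
      pv_mem_ind board i (j - 1) (hpre _ hmem2 _ hmem4 (by omega)),
      pv_mem_ind board i (j + 1) (hpre _ hmem2 _ hmem6 (by omega)),
      pv_mem_ind board (i + 1) (j - 1) (hpre _ hmem3 _ hmem4 (by omega)),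
      pv_mem_ind board (i + 1) j (hpre _ hmem3 _ hmem5 (by omega)),
      pv_mem_ind board (i + 1) (j + 1) (hpre _ hmem3 _ hmem6 (by omega))]
  ring

-- ===== VERDICT (by name: the statement is the Claim_ definition above) =====
theorem get_alive_neighbours_count_spec : Claim_equal_get_alive_neighbours_count := by
  intro board i j _ hpre
  unfold Spec_get_alive_neighbours_count
  rw [pv_A_eq, pv_B_eq board i j hpre]
  ring
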